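-- pv_equiv track=rewrite | github.com/viyanta/viyanta_web | backend/services/pdf_splitted_extraction_enhanced_backup.py | merge_row_continuations
-- ===== SOURCE A (Python) =====
-- from typing import List, Dict, Any, Tuple, Optional
--
-- def merge_row_continuations(main_row: List[str], continuation_rows: List[List[str]]) -> List[str]:
--     """Merge continuation rows into main row"""
--     merged = main_row[:]
--
--     for cont_row in continuation_rows:
--         for i, cell in enumerate(cont_row):
--             if i < len(merged) and cell.strip():
--                 # Merge cell content
--                 if merged[i].strip():
--                     merged[i] = f"{merged[i].strip()} {cell.strip()}"
--                 else:
--                     merged[i] = cell.strip()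
--
--     return merged
-- ===== SOURCE B (Python) =====
-- def merge_row_continuations(main_row, continuation_rows):
--     """Merge continuation rows into main row: gather per-column contributions, then join once."""
--     buckets = [[] for _ in main_row]
--     for row in continuation_rows:
--         for i, cell in enumerate(row[:len(main_row)]):
--             s = cell.strip()
--             if s:
--                 buckets[i].append(s)
--     result = []
--     for cell, extra in zip(main_row, buckets):
--         if not extra:
--             result.append(cell)
--         else:
--             head = cell.strip()
--             result.append(' '.join(([head] if head else []) + extra))
--     return result
-- ===== Notes on version B (the rewrite author's own statement) =====
-- stated objective: alternative
-- what changed: B first gathers, in one pass over the continuation rows, a per-column bucket of the truthy stripped cells, then builds each output cell with a single ' '.join (raw cell if its bucket is empty), replacing A's row-by-row in-place re-strip-and-concatenate updates.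
import Mathlib
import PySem

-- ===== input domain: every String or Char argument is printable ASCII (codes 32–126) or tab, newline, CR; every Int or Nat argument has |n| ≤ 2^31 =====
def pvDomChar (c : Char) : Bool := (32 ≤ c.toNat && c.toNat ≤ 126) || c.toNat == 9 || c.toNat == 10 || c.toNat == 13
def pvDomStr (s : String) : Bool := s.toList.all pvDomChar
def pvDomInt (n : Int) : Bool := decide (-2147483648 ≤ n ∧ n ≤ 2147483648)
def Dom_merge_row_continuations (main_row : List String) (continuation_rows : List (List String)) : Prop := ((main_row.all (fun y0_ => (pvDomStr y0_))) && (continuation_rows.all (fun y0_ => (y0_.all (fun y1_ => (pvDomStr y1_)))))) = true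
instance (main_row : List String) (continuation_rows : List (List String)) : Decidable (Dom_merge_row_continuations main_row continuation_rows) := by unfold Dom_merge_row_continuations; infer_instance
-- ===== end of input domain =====

-- B gathers per-column contribution lists in one pass and then emits each column with a
-- single ' '.join, instead of A's in-place re-strip-and-concatenate updates; alternative decomposition.

-- ===== PORT A =====
-- literal transliteration of A: copy main_row, then for each continuation row and each
-- enumerated cell, merge in place when the index is in range and the stripped cell is truthy;
-- the f-string "{a} {b}" is ported exactly as String.ofList (a.toList ++ ' ' :: b.toList).
def merge_row_continuations (main_row : List String) (continuation_rows : List (List String)) : List String :=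
  continuation_rows.foldl (fun merged cont_row =>
    (PySem.List.enumerate cont_row).foldl (fun merged ic =>
      if ic.1 < (merged.length : Int) ∧ PySem.Str.strip ic.2 ≠ "" then
        if PySem.Str.strip (PySem.List.pyGetD merged ic.1 "") ≠ "" then
          PySem.List.pySetD merged ic.1
            (String.ofList ((PySem.Str.strip (PySem.List.pyGetD merged ic.1 "")).toList
              ++ ' ' :: (PySem.Str.strip ic.2).toList))
        else
          PySem.List.pySetD merged ic.1 (PySem.Str.strip ic.2)
      else merged) merged) main_row

-- ===== PORT B =====
-- literal transliteration of B (Source B): first gather the truthy stripped continuation cells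
-- into per-column buckets (row sliced to the main row's width), then emit each column:
-- untouched columns keep the raw cell, touched ones become one ' '.join.
def merge_row_continuations_alt (main_row : List String) (continuation_rows : List (List String)) : List String :=
  let buckets := continuation_rows.foldl (fun bks row =>
    (PySem.List.enumerate (PySem.List.slice row none (some (main_row.length : Int)))).foldl
      (fun bks ic =>
        let st := PySem.Str.strip ic.2
        if st ≠ "" then PySem.List.pySetD bks ic.1 (PySem.List.pyGetD bks ic.1 [] ++ [st]) else bks)
      bks) (main_row.map (fun _ => ([] : List String)))
  (main_row.zip buckets).map (fun ce =>
    if ce.2 = [] then ce.1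
    else
      let head := PySem.Str.strip ce.1
      PySem.Str.join " " ((if head ≠ "" then [head] else []) ++ ce.2))

-- ===== PRECONDITION & SPEC =====
def Spec_merge_row_continuations (main_row : List String) (continuation_rows : List (List String)) (out : List String) : Prop := out = merge_row_continuations_alt main_row continuation_rows
instance (main_row : List String) (continuation_rows : List (List String)) (out : List String) : Decidable (Spec_merge_row_continuations main_row continuation_rows out) := by unfold Spec_merge_row_continuations; infer_instance

-- ===== CLAIM (what is proved, stated in full; the proofs are below) =====
def Claim_equal_merge_row_continuations : Prop := ∀ (main_row : List String) (continuation_rows : List (List String)), Dom_merge_row_continuations main_row continuation_rows → Spec_merge_row_continuations main_row continuation_rows (merge_row_continuations main_row continuation_rows)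

-- ===== LEMMAS AND PROOFS =====

-- proof-side names for A's two nested loop bodies (definitionally the port's lambdas)
def pvStepCell (merged : List String) (ic : Int × String) : List String :=
  if ic.1 < (merged.length : Int) ∧ PySem.Str.strip ic.2 ≠ "" then
    if PySem.Str.strip (PySem.List.pyGetD merged ic.1 "") ≠ "" then
      PySem.List.pySetD merged ic.1
        (String.ofList ((PySem.Str.strip (PySem.List.pyGetD merged ic.1 "")).toList
          ++ ' ' :: (PySem.Str.strip ic.2).toList))
    else
      PySem.List.pySetD merged ic.1 (PySem.Str.strip ic.2)
  else merged

def pvRowStep (merged : List String) (cont_row : List String) : List String :=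
  (PySem.List.enumerate cont_row).foldl pvStepCell merged

-- per-column combining step (c is an already-stripped, nonempty contribution)
def pvCat (a b : String) : String := String.ofList (a.toList ++ ' ' :: b.toList)

def pvStepC (v c : String) : String :=
  if PySem.Str.strip v ≠ "" then pvCat (PySem.Str.strip v) c else c

def pvColA (v : String) (cs : List String) : String := cs.foldl pvStepC v

def pvContribs (j : Nat) (cont : List (List String)) : List String :=
  cont.filterMap (fun row =>
    if j < row.length then
      (if PySem.Str.strip (row.getD j "") ≠ "" then some (PySem.Str.strip (row.getD j "")) else none)
    else none)

def pvGood (s : String) : Prop := PySem.Str.strip s = s ∧ s ≠ ""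

theorem pv_merge_eq (m : List String) (c : List (List String)) :
    merge_row_continuations m c = c.foldl pvRowStep m := rfl

-- ---- string / strip facts ----

theorem pv_dw_head? (p : Char → Bool) (l : List Char) :
    ∀ c, (List.dropWhile p l).head? = some c → p c = false := by
  intro c hc
  have h := List.head?_dropWhile_not p l
  rw [hc] at h
  exact h

theorem pv_dw_idem (p : Char → Bool) (l : List Char) :
    List.dropWhile p (List.dropWhile p l) = List.dropWhile p l := by
  rw [List.dropWhile_eq_self_iff]
  intro hl
  have e : (List.dropWhile p l).head? = some ((List.dropWhile p l)[0]) := by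
    rw [List.head?_eq_getElem?, List.getElem?_eq_getElem hl]
  simpa using pv_dw_head? p l _ e

theorem pv_rstrip_rstrip (x : List Char) :
    PySem.Chars.rstrip (PySem.Chars.rstrip x) = PySem.Chars.rstrip x := by
  simp [PySem.Chars.rstrip, pv_dw_idem]

-- strip a = a forces lstrip a = a and rstrip a = a (length argument)
theorem pv_strip_parts (a : List Char) (h : PySem.Chars.strip a = a) :
    PySem.Chars.lstrip a = a ∧ PySem.Chars.rstrip a = a := by
  have hls : PySem.Chars.lstrip a = a := by
    have hsuf : PySem.Chars.lstrip a <:+ a := List.dropWhile_suffix _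
    apply List.IsSuffix.eq_of_length hsuf
    have h1 : (PySem.Chars.strip a).length ≤ (PySem.Chars.lstrip a).length := by
      unfold PySem.Chars.strip PySem.Chars.rstrip
      have hs :=
        (List.dropWhile_sublist (l := (PySem.Chars.lstrip a).reverse)
          (p := PySem.Chars.isspace)).length_le
      simpa using hs
    have h2 : (PySem.Chars.lstrip a).length ≤ a.length := hsuf.length_le
    have h3 : (PySem.Chars.strip a).length = a.length := by rw [h]
    omega
  refine ⟨hls, ?_⟩
  calc PySem.Chars.rstrip a = PySem.Chars.rstrip (PySem.Chars.lstrip a) := by rw [hls]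
    _ = a := h

-- the result of strip, when nonempty, is itself stripped
theorem pv_strip_idem (s : List Char) (h : PySem.Chars.strip s ≠ []) :
    PySem.Chars.strip (PySem.Chars.strip s) = PySem.Chars.strip s := by
  have hr : PySem.Chars.rstrip (PySem.Chars.strip s) = PySem.Chars.strip s := by
    unfold PySem.Chars.strip
    exact pv_rstrip_rstrip _
  have hst : PySem.Chars.strip s = PySem.Chars.rstrip (PySem.Chars.lstrip s) := rfl
  have hl : PySem.Chars.lstrip (PySem.Chars.strip s) = PySem.Chars.strip s := by
    obtain ⟨pre, hpre⟩ :
        List.dropWhile PySem.Chars.isspace (PySem.Chars.lstrip s).reverse <:+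
          (PySem.Chars.lstrip s).reverse :=
      List.dropWhile_suffix _
    have htdec : PySem.Chars.lstrip s = PySem.Chars.strip s ++ pre.reverse := by
      rw [hst]
      unfold PySem.Chars.rstrip
      have := congrArg List.reverse hpre
      simpa using this.symm
    have hlen : 0 < (PySem.Chars.strip s).length := List.length_pos_iff.mpr h
    show List.dropWhile PySem.Chars.isspace (PySem.Chars.strip s) = PySem.Chars.strip s
    rw [List.dropWhile_eq_self_iff]
    intro hl0
    have e2 : (PySem.Chars.lstrip s)[0]? = some ((PySem.Chars.strip s)[0]'hl0) := by
      rw [htdec, List.getElem?_append_left hl0, List.getElem?_eq_getElem hl0]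
    have e3 : (List.dropWhile PySem.Chars.isspace s).head? =
        some ((PySem.Chars.strip s)[0]'hl0) := by
      rw [List.head?_eq_getElem?]
      exact e2
    simpa using pv_dw_head? PySem.Chars.isspace s _ e3
  calc PySem.Chars.strip (PySem.Chars.strip s)
      = PySem.Chars.rstrip (PySem.Chars.lstrip (PySem.Chars.strip s)) := rfl
    _ = PySem.Chars.rstrip (PySem.Chars.strip s) := by rw [hl]
    _ = PySem.Chars.strip s := hr

theorem pv_good_strip (s : String) (h : PySem.Str.strip s ≠ "") : pvGood (PySem.Str.strip s) := by
  constructor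
  · have hne : PySem.Chars.strip s.toList ≠ [] := by
      intro hc
      apply h
      have : (PySem.Str.strip s).toList = ([] : List Char) := by
        rw [PySem.Str.toList_strip, hc]
      exact String.toList_inj.mp (by simpa using this)
    apply String.toList_inj.mp
    rw [PySem.Str.toList_strip, PySem.Str.toList_strip]
    exact pv_strip_idem _ hne
  · exact h

theorem pv_good_cat (a b : String) (ha : pvGood a) (hb : pvGood b) : pvGood (pvCat a b) := by
  obtain ⟨has, hane⟩ := ha
  obtain ⟨hbs, hbne⟩ := hb
  have hal : a.toList ≠ [] := fun hc => hane (String.toList_inj.mp (by simpa using hc))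
  have hbl : b.toList ≠ [] := fun hc => hbne (String.toList_inj.mp (by simpa using hc))
  have haparts := pv_strip_parts a.toList (by
    have := congrArg String.toList has
    rwa [PySem.Str.toList_strip] at this)
  have hbparts := pv_strip_parts b.toList (by
    have := congrArg String.toList hbs
    rwa [PySem.Str.toList_strip] at this)
  have hls : PySem.Chars.lstrip (a.toList ++ ' ' :: b.toList) = a.toList ++ ' ' :: b.toList := by
    unfold PySem.Chars.lstrip at haparts ⊢
    rw [List.dropWhile_append, haparts.1]
    simp [List.isEmpty_iff, hal]
  have hrs : PySem.Chars.rstrip (a.toList ++ ' ' :: b.toList) = a.toList ++ ' ' :: b.toList := by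
    have hbr : List.dropWhile PySem.Chars.isspace b.toList.reverse = b.toList.reverse := by
      have := hbparts.2
      unfold PySem.Chars.rstrip at this
      have := congrArg List.reverse this
      simpa using this
    unfold PySem.Chars.rstrip
    rw [show (a.toList ++ ' ' :: b.toList).reverse = b.toList.reverse ++ ' ' :: a.toList.reverse by
      simp]
    rw [List.dropWhile_append, hbr]
    simp [List.isEmpty_iff, hbl]
  constructor
  · apply String.toList_inj.mp
    rw [PySem.Str.toList_strip]
    unfold pvCat
    rw [String.toList_ofList]
    unfold PySem.Chars.strip
    rw [hls, hrs]
  · intro hc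
    have : (pvCat a b).toList = [] := by rw [hc]; rfl
    unfold pvCat at this
    rw [String.toList_ofList] at this
    simp at this

-- ---- inner loop characterisation ----

theorem pv_len_inner (row : List String) (s : Int) (merged : List String) :
    ((PySem.List.enumerate row s).foldl pvStepCell merged).length = merged.length := by
  induction row generalizing s merged with
  | nil => simp [PySem.List.enumerate]
  | cons r rs ih =>
    rw [PySem.List.enumerate_cons, List.foldl_cons, ih]
    unfold pvStepCell
    split_ifs <;> simp [PySem.List.length_pySetD]

theorem pv_len_rowstep (merged row : List String) :
    (pvRowStep merged row).length = merged.length := pv_len_inner row 0 merged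

-- one inner pass touches each index at most once
theorem pv_inner_getD (row : List String) (s : Nat) (merged : List String) (j : Nat)
    (hj : j < merged.length) :
    ((PySem.List.enumerate row (s : Int)).foldl pvStepCell merged).getD j "" =
      if s ≤ j ∧ j - s < row.length then
        (if PySem.Str.strip (row.getD (j - s) "") ≠ "" then
          pvStepC (merged.getD j "") (PySem.Str.strip (row.getD (j - s) ""))
        else merged.getD j "")
      else merged.getD j "" := by
  induction row generalizing s merged with
  | nil =>
    simp only [PySem.List.enumerate, List.foldl_nil, List.length_nil]
    rw [if_neg (by omega)]
  | cons r rs ih =>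
    rw [PySem.List.enumerate_cons, List.foldl_cons]
    have hcast : (s : Int) + 1 = ((s + 1 : Nat) : Int) := by push_cast; ring
    have hlen' : j < (pvStepCell merged ((s : Int), r)).length := by
      unfold pvStepCell
      split_ifs <;> simp [hj]
    rw [hcast, ih (s + 1) _ hlen']
    simp only [List.length_cons]
    by_cases hjs : j = s
    · subst hjs
      have hstep : pvStepCell merged ((j : Int), r) =
          if PySem.Str.strip r ≠ "" then
            merged.set j (pvStepC (merged.getD j "") (PySem.Str.strip r))
          else merged := by
        unfold pvStepCell pvStepC pvCat
        simp only [PySem.List.pyGetD_natCast, PySem.List.pySetD_natCast]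
        by_cases h1 : PySem.Str.strip r ≠ ""
        · rw [if_pos ⟨by exact_mod_cast hj, h1⟩, if_pos h1]
          by_cases h2 : PySem.Str.strip (merged.getD j "") ≠ ""
          · rw [if_pos h2, if_pos h2]
          · rw [if_neg h2, if_neg h2]
        · rw [if_neg (fun hc => h1 hc.2), if_neg h1]
      rw [hstep]
      by_cases hr : PySem.Str.strip r ≠ ""
      · rw [if_pos hr]
        rw [if_neg (show ¬(j + 1 ≤ j ∧ j - (j + 1) < rs.length) by omega)]
        rw [if_pos (show j ≤ j ∧ j - j < rs.length + 1 by omega)]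
        simp only [Nat.sub_self, List.getD_cons_zero]
        rw [if_pos hr]
        simp [List.getD_eq_getElem?_getD, hj]
      · rw [if_neg hr]
        rw [if_neg (show ¬(j + 1 ≤ j ∧ j - (j + 1) < rs.length) by omega)]
        rw [if_pos (show j ≤ j ∧ j - j < rs.length + 1 by omega)]
        simp only [Nat.sub_self, List.getD_cons_zero]
        rw [if_neg hr]
    · have hM : (pvStepCell merged ((s : Int), r)).getD j "" = merged.getD j "" := by
        unfold pvStepCell
        simp only [PySem.List.pyGetD_natCast, PySem.List.pySetD_natCast]
        split_ifs <;>
          simp [List.getD_eq_getElem?_getD, List.getElem?_set_ne (by omega : (s : Nat) ≠ j)]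
      rw [hM]
      by_cases hlt : j < s
      · rw [if_neg (by omega), if_neg (by omega)]
      · have hidx : j - s = (j - (s + 1)) + 1 := by omega
        rw [hidx]
        simp only [List.getD_cons_succ]
        by_cases hcond : j - (s + 1) < rs.length
        · rw [if_pos (show s + 1 ≤ j ∧ j - (s + 1) < rs.length from ⟨by omega, hcond⟩),
              if_pos (show s ≤ j ∧ j - (s + 1) + 1 < rs.length + 1 by omega)]
        · rw [if_neg (show ¬(s + 1 ≤ j ∧ j - (s + 1) < rs.length) by omega),
              if_neg (show ¬(s ≤ j ∧ j - (s + 1) + 1 < rs.length + 1) by omega)]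

-- ---- outer loop: per-column contributions ----

theorem pv_outer_getD (cont : List (List String)) (merged : List String) (j : Nat)
    (hj : j < merged.length) :
    ((cont.foldl pvRowStep merged).getD j "") = pvColA (merged.getD j "") (pvContribs j cont) := by
  induction cont generalizing merged with
  | nil => simp [pvContribs, pvColA]
  | cons row rest ih =>
    rw [List.foldl_cons, ih _ (by rw [pv_len_rowstep]; exact hj)]
    have h0 : pvRowStep merged row =
        (PySem.List.enumerate row ((0 : Nat) : Int)).foldl pvStepCell merged := rfl
    rw [h0, pv_inner_getD row 0 merged j hj]
    simp only [Nat.sub_zero, Nat.zero_le, true_and]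
    unfold pvContribs
    rw [List.filterMap_cons]
    by_cases h1 : j < row.length
    · by_cases h2 : PySem.Str.strip (row.getD j "") ≠ ""
      · rw [if_pos h1, if_pos h2,
            show (if j < row.length then
                (if PySem.Str.strip (row.getD j "") ≠ ""
                  then some (PySem.Str.strip (row.getD j "")) else none)
              else none) = some (PySem.Str.strip (row.getD j "")) by rw [if_pos h1, if_pos h2]]
        rfl
      · rw [if_pos h1, if_neg h2,
            show (if j < row.length then
                (if PySem.Str.strip (row.getD j "") ≠ ""
                  then some (PySem.Str.strip (row.getD j "")) else none)
              else none) = none by rw [if_pos h1, if_neg h2]]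
    · rw [if_neg h1,
          show (if j < row.length then
              (if PySem.Str.strip (row.getD j "") ≠ ""
                then some (PySem.Str.strip (row.getD j "")) else none)
            else none) = none by rw [if_neg h1]]

-- ---- column closed form ----

theorem pv_col_closed (cs : List String) (v : String)
    (hg : ∀ c ∈ cs, pvGood c) :
    pvColA v cs =
      if cs = [] then v
      else PySem.Str.join " "
        ((if PySem.Str.strip v ≠ "" then [PySem.Str.strip v] else []) ++ cs) := by
  induction cs generalizing v with
  | nil => simp [pvColA]
  | cons c cs ih =>
    have hgc : pvGood c := hg c (by simp)
    have step : pvColA v (c :: cs) = pvColA (pvStepC v c) cs := rfl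
    rw [step, ih _ (fun x hx => hg x (by simp [hx]))]
    rw [if_neg (List.cons_ne_nil c cs)]
    by_cases hv : PySem.Str.strip v ≠ ""
    · have hgv := pv_good_strip v hv
      have hgcat := pv_good_cat _ _ hgv hgc
      have hcatne : PySem.Str.strip (pvCat (PySem.Str.strip v) c) ≠ "" := by
        rw [hgcat.1]; exact hgcat.2
      have hstep : pvStepC v c = pvCat (PySem.Str.strip v) c := by
        unfold pvStepC; rw [if_pos hv]
      rw [hstep, if_pos hv]
      rcases cs with _ | ⟨d, ds⟩
      · rw [if_pos rfl]
        apply String.toList_inj.mp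
        rw [PySem.Str.toList_join]
        simp only [List.cons_append, List.nil_append, List.map]
        rw [PySem.Chars.join_cons_cons, PySem.Chars.join_singleton]
        unfold pvCat
        rw [String.toList_ofList]
        simp
      · rw [if_neg (List.cons_ne_nil d ds), if_pos hcatne, hgcat.1]
        apply String.toList_inj.mp
        rw [PySem.Str.toList_join, PySem.Str.toList_join]
        simp only [List.cons_append, List.nil_append, List.map]
        rw [PySem.Chars.join_cons_cons, PySem.Chars.join_cons_cons, PySem.Chars.join_cons_cons]
        unfold pvCat
        rw [String.toList_ofList]
        simp
    · have hstep : pvStepC v c = c := by unfold pvStepC; rw [if_neg hv]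
      have hc' : PySem.Str.strip c ≠ "" := by rw [hgc.1]; exact hgc.2
      rw [hstep, if_neg hv, List.nil_append]
      rcases cs with _ | ⟨d, ds⟩
      · rw [if_pos rfl]
        apply String.toList_inj.mp
        rw [PySem.Str.toList_join]
        simp only [List.map]
        rw [PySem.Chars.join_singleton]
      · rw [if_neg (List.cons_ne_nil d ds), if_pos hc', hgc.1]
        simp only [List.cons_append, List.nil_append]

theorem pv_contribs_good (j : Nat) (cont : List (List String)) :
    ∀ c ∈ pvContribs j cont, pvGood c := by
  intro c hc
  unfold pvContribs at hc
  rw [List.mem_filterMap] at hc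
  obtain ⟨row, _, hrow⟩ := hc
  split_ifs at hrow with h1 h2
  · simp only [Option.some_inj] at hrow
    subst hrow
    exact pv_good_strip _ h2

-- ---- B's gather phase: bucket characterisation ----

def pvBCell (bks : List (List String)) (ic : Int × String) : List (List String) :=
  if PySem.Str.strip ic.2 ≠ "" then
    PySem.List.pySetD bks ic.1 (PySem.List.pyGetD bks ic.1 [] ++ [PySem.Str.strip ic.2])
  else bks

def pvBRow (n : Nat) (bks : List (List String)) (row : List String) : List (List String) :=
  (PySem.List.enumerate (List.take n row) 0).foldl pvBCell bks

theorem pv_blen_inner (row : List String) (s : Int) (bks : List (List String)) :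
    ((PySem.List.enumerate row s).foldl pvBCell bks).length = bks.length := by
  induction row generalizing s bks with
  | nil => simp [PySem.List.enumerate]
  | cons r rs ih =>
    rw [PySem.List.enumerate_cons, List.foldl_cons, ih]
    unfold pvBCell
    split_ifs <;> simp [PySem.List.length_pySetD]

theorem pv_binner_getD (row : List String) (s : Nat) (bks : List (List String)) (j : Nat)
    (hj : j < bks.length) :
    ((PySem.List.enumerate row (s : Int)).foldl pvBCell bks).getD j [] =
      if s ≤ j ∧ j - s < row.length then
        (if PySem.Str.strip (row.getD (j - s) "") ≠ "" then
          bks.getD j [] ++ [PySem.Str.strip (row.getD (j - s) "")]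
        else bks.getD j [])
      else bks.getD j [] := by
  induction row generalizing s bks with
  | nil =>
    simp only [PySem.List.enumerate, List.foldl_nil, List.length_nil]
    rw [if_neg (by omega)]
  | cons r rs ih =>
    rw [PySem.List.enumerate_cons, List.foldl_cons]
    have hcast : (s : Int) + 1 = ((s + 1 : Nat) : Int) := by push_cast; ring
    have hlen' : j < (pvBCell bks ((s : Int), r)).length := by
      unfold pvBCell
      split_ifs <;> simp [hj]
    rw [hcast, ih (s + 1) _ hlen']
    simp only [List.length_cons]
    by_cases hjs : j = s
    · subst hjs
      have hstep : pvBCell bks ((j : Int), r) =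
          if PySem.Str.strip r ≠ "" then
            bks.set j (bks.getD j [] ++ [PySem.Str.strip r])
          else bks := by
        unfold pvBCell
        simp only [PySem.List.pyGetD_natCast, PySem.List.pySetD_natCast]
      rw [hstep]
      by_cases hr : PySem.Str.strip r ≠ ""
      · rw [if_pos hr]
        rw [if_neg (show ¬(j + 1 ≤ j ∧ j - (j + 1) < rs.length) by omega)]
        rw [if_pos (show j ≤ j ∧ j - j < rs.length + 1 by omega)]
        simp only [Nat.sub_self, List.getD_cons_zero]
        rw [if_pos hr]
        simp [List.getD_eq_getElem?_getD, hj]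
      · rw [if_neg hr]
        rw [if_neg (show ¬(j + 1 ≤ j ∧ j - (j + 1) < rs.length) by omega)]
        rw [if_pos (show j ≤ j ∧ j - j < rs.length + 1 by omega)]
        simp only [Nat.sub_self, List.getD_cons_zero]
        rw [if_neg hr]
    · have hM : (pvBCell bks ((s : Int), r)).getD j [] = bks.getD j [] := by
        unfold pvBCell
        simp only [PySem.List.pyGetD_natCast, PySem.List.pySetD_natCast]
        split_ifs <;>
          simp [List.getD_eq_getElem?_getD, List.getElem?_set_ne (by omega : (s : Nat) ≠ j)]
      rw [hM]
      by_cases hlt : j < s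
      · rw [if_neg (by omega), if_neg (by omega)]
      · have hidx : j - s = (j - (s + 1)) + 1 := by omega
        rw [hidx]
        simp only [List.getD_cons_succ]
        by_cases hcond : j - (s + 1) < rs.length
        · rw [if_pos (show s + 1 ≤ j ∧ j - (s + 1) < rs.length from ⟨by omega, hcond⟩),
              if_pos (show s ≤ j ∧ j - (s + 1) + 1 < rs.length + 1 by omega)]
        · rw [if_neg (show ¬(s + 1 ≤ j ∧ j - (s + 1) < rs.length) by omega),
              if_neg (show ¬(s ≤ j ∧ j - (s + 1) + 1 < rs.length + 1) by omega)]

theorem pv_blen_row (n : Nat) (bks : List (List String)) (row : List String) :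
    (pvBRow n bks row).length = bks.length := pv_blen_inner _ 0 bks

theorem pv_blen_outer (n : Nat) (cont : List (List String)) (bks : List (List String)) :
    (cont.foldl (pvBRow n) bks).length = bks.length := by
  induction cont generalizing bks with
  | nil => rfl
  | cons row rest ih => rw [List.foldl_cons, ih, pv_blen_row]

theorem pv_bouter_getD (n : Nat) (cont : List (List String)) (bks : List (List String))
    (j : Nat) (hj : j < bks.length) (hjn : j < n) :
    (cont.foldl (pvBRow n) bks).getD j [] = bks.getD j [] ++ pvContribs j cont := by
  induction cont generalizing bks with
  | nil => simp [pvContribs]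
  | cons row rest ih =>
    rw [List.foldl_cons, ih _ (by rw [pv_blen_row]; exact hj)]
    have h0 : pvBRow n bks row =
        (PySem.List.enumerate (List.take n row) ((0 : Nat) : Int)).foldl pvBCell bks := rfl
    rw [h0, pv_binner_getD (List.take n row) 0 bks j hj]
    simp only [Nat.sub_zero, Nat.zero_le, true_and, List.length_take]
    have htake : (List.take n row).getD j "" = row.getD j "" := by
      simp [List.getD_eq_getElem?_getD, hjn]
    rw [htake]
    unfold pvContribs
    rw [List.filterMap_cons]
    by_cases h1 : j < row.length
    · by_cases h2 : PySem.Str.strip (row.getD j "") ≠ ""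
      · rw [if_pos (show j < min n row.length by omega), if_pos h2, if_pos h1, if_pos h2]
        simp
      · rw [if_pos (show j < min n row.length by omega), if_neg h2, if_pos h1, if_neg h2]
    · rw [if_neg (show ¬j < min n row.length by omega),
          show (if j < row.length then
              (if PySem.Str.strip (row.getD j "") ≠ ""
                then some (PySem.Str.strip (row.getD j "")) else none)
            else none) = none by rw [if_neg h1]]

theorem pv_bzero (main_row : List String) (j : Nat) :
    ((main_row.map (fun _ => ([] : List String))).getD j []) = [] := by
  rcases main_row[j]? with _ | x <;> simp [List.getD_eq_getElem?_getD]

-- A's outer fold preserves the length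
theorem pv_lenA (cont : List (List String)) (main_row : List String) :
    (cont.foldl pvRowStep main_row).length = main_row.length := by
  induction cont generalizing main_row with
  | nil => rfl
  | cons row rest ih => rw [List.foldl_cons, ih, pv_len_rowstep]

-- ===== VERDICT (by name: the statement is the Claim_ definition above) =====
theorem merge_row_continuations_spec : Claim_equal_merge_row_continuations := by
  unfold Claim_equal_merge_row_continuations
  intro main_row cont _
  unfold Spec_merge_row_continuations
  -- the port's gather loop is pvBRow main_row.length
  have hfun : (fun (bks : List (List String)) (row : List String) =>
      (PySem.List.enumerate (PySem.List.slice row none (some (main_row.length : Int)))).foldl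
        (fun bks ic =>
          let st := PySem.Str.strip ic.2
          if st ≠ "" then PySem.List.pySetD bks ic.1 (PySem.List.pyGetD bks ic.1 [] ++ [st]) else bks)
        bks) = pvBRow main_row.length := by
    funext bks row
    unfold pvBRow
    rw [PySem.List.slice_to row (by exact_mod_cast Nat.zero_le _)]
    simp only [Int.toNat_natCast]
    rfl
  have hB : merge_row_continuations_alt main_row cont =
      (main_row.zip (cont.foldl (pvBRow main_row.length)
        (main_row.map (fun _ => ([] : List String))))).map (fun ce =>
          if ce.2 = [] then ce.1
          else PySem.Str.join " "
            ((if PySem.Str.strip ce.1 ≠ "" then [PySem.Str.strip ce.1] else []) ++ ce.2)) := by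
    unfold merge_row_continuations_alt
    rw [hfun]
  have hbklen : (cont.foldl (pvBRow main_row.length)
      (main_row.map (fun _ => ([] : List String)))).length = main_row.length := by
    rw [pv_blen_outer, List.length_map]
  have hlenA : (merge_row_continuations main_row cont).length = main_row.length := by
    rw [pv_merge_eq]; exact pv_lenA cont main_row
  rw [hB]
  apply List.ext_getElem
  · rw [hlenA, List.length_map, List.length_zip, hbklen, Nat.min_self]
  · intro j hja hjb
    have hj : j < main_row.length := by rwa [hlenA] at hja
    have hA : (merge_row_continuations main_row cont)[j]'hja =
        pvColA (main_row.getD j "") (pvContribs j cont) := by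
      rw [← pv_outer_getD cont main_row j hj]
      rw [List.getD_eq_getElem?_getD, ← pv_merge_eq, List.getElem?_eq_getElem hja]
      rfl
    have hjz : j < (main_row.zip (cont.foldl (pvBRow main_row.length)
        (main_row.map (fun _ => ([] : List String))))).length := by
      rw [List.length_zip, hbklen, Nat.min_self]; exact hj
    have hbk : (cont.foldl (pvBRow main_row.length)
        (main_row.map (fun _ => ([] : List String))))[j]'(by rw [hbklen]; exact hj) =
        pvContribs j cont := by
      have h1 := pv_bouter_getD main_row.length cont
        (main_row.map (fun _ => ([] : List String))) j (by rw [List.length_map]; exact hj) hj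
      rw [pv_bzero, List.nil_append] at h1
      rw [← h1, List.getD_eq_getElem?_getD,
        List.getElem?_eq_getElem (by rw [hbklen]; exact hj : j < _)]
      rfl
    rw [hA, List.getElem_map, List.getElem_zip, hbk]
    rw [pv_col_closed _ _ (pv_contribs_good j cont)]
    rw [List.getD_eq_getElem?_getD, List.getElem?_eq_getElem hj]
    rfl
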